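-- pv_equiv track=rewrite | github.com/8abak/ctrade-openapi-client | datavis/research/entry.py | longest_same_sign_streak
-- ===== SOURCE A (Python) =====
-- from typing import Any, Callable, Dict, Iterable, List, Optional, Sequence
--
-- def longest_same_sign_streak(values: Sequence[int]) -> int:
--     longest = 0
--     current = 0
--     last = 0
--     for value in values:
--         if value == 0:
--             current = 0
--             last = 0
--             continue
--         if value == last:
--             current += 1
--         else:
--             current = 1
--             last = value
--         longest = max(longest, current)
--     return longest
-- ===== SOURCE B (Python) =====
-- def longest_same_sign_streak(values):
--     # Phase 1: run-length encode the sequence.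
--     runs = []
--     for v in values:
--         if runs and runs[-1][0] == v:
--             runs[-1][1] += 1
--         else:
--             runs.append([v, 1])
--     # Phase 2: longest nonzero-valued run.
--     return max((n for v, n in runs if v != 0), default=0)
-- ===== Notes on version B (the rewrite author's own statement) =====
-- stated objective: alternative
-- what changed: B replaces A's scalar last/current/longest accumulator with a two-phase algorithm: build an explicit run-length encoding of the list, then take the maximum length over runs with nonzero value (default 0).
import Mathlib
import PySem

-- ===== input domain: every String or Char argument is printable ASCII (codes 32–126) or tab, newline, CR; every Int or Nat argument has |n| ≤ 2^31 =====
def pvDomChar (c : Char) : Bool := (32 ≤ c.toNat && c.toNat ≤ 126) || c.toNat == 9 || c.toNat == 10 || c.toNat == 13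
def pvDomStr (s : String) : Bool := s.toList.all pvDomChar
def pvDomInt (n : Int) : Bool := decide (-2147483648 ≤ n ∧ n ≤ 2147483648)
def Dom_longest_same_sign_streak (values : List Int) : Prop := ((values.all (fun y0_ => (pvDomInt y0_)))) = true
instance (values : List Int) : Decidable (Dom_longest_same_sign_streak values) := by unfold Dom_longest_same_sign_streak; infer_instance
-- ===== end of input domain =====

-- B is an alternative decomposition of the same O(n) task: explicit run-length encoding then a maximum, instead of A's scalar accumulator; return value only, no mutation observable.

-- ===== PORT A =====
-- state = (longest, current, last), exactly A's three locals
def lsssStepA (s : Int × Int × Int) (value : Int) : Int × Int × Int :=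
  if value = 0 then (s.1, 0, 0)
  else if value = s.2.2 then (max s.1 (s.2.1 + 1), s.2.1 + 1, s.2.2)
  else (max s.1 1, 1, value)

def longest_same_sign_streak (values : List Int) : Int :=
  (values.foldl lsssStepA (0, 0, 0)).1

-- ===== PORT B =====
-- one step of building the run-length encoding: `runs[-1][1] += 1` becomes dropLast ++ [bumped last]
def lsssRle (runs : List (Int × Int)) (v : Int) : List (Int × Int) :=
  match runs.getLast? with
  | some p => if p.1 = v then runs.dropLast ++ [(p.1, p.2 + 1)] else runs ++ [(v, 1)]
  | none => runs ++ [(v, 1)]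

def longest_same_sign_streak_alt (values : List Int) : Int :=
  let runs := values.foldl lsssRle []
  -- max((n for v, n in runs if v != 0), default=0)
  match PySem.List.max? (runs.filterMap (fun p => if p.1 ≠ 0 then some p.2 else none)) (fun n => n) with
  | some m => m
  | none => 0

-- ===== PRECONDITION & SPEC =====
def Spec_longest_same_sign_streak (values : List Int) (out : Int) : Prop := out = longest_same_sign_streak_alt values
instance (values : List Int) (out : Int) : Decidable (Spec_longest_same_sign_streak values out) := by unfold Spec_longest_same_sign_streak; infer_instance

-- ===== CLAIM (what is proved, stated in full; the proofs are below) =====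
def Claim_equal_longest_same_sign_streak : Prop := ∀ (values : List Int), Dom_longest_same_sign_streak values → Spec_longest_same_sign_streak values (longest_same_sign_streak values)

-- ===== LEMMAS AND PROOFS =====

-- max over the nonzero-valued runs (the value B's phase 2 extracts), as a plain fold
def lsssMaxNZ (rs : List (Int × Int)) : Int :=
  rs.foldl (fun m p => if p.1 ≠ 0 then max m p.2 else m) 0

-- invariant tying A's scalar state to B's run list
def lsssInv (L c last : Int) (rs : List (Int × Int)) : Prop :=
  L = lsssMaxNZ rs ∧
  (match rs.getLast? with
   | none => c = 0 ∧ last = 0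
   | some p => if p.1 ≠ 0 then c = p.2 ∧ last = p.1 else c = 0 ∧ last = 0) ∧
  (∀ p ∈ rs, (1 : Int) ≤ p.2)

lemma lsssMaxNZ_concat (rs : List (Int × Int)) (p : Int × Int) :
    lsssMaxNZ (rs ++ [p]) = if p.1 ≠ 0 then max (lsssMaxNZ rs) p.2 else lsssMaxNZ rs := by
  simp [lsssMaxNZ, List.foldl_append]

lemma lsssInv_step (L c last v : Int) (rs : List (Int × Int))
    (h : lsssInv L c last rs) :
    lsssInv (lsssStepA (L, c, last) v).1 (lsssStepA (L, c, last) v).2.1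
      (lsssStepA (L, c, last) v).2.2 (lsssRle rs v) := by
  obtain ⟨hL, hcl, hlen⟩ := h
  cases h' : rs.getLast? with
  | none =>
      have hrs : rs = [] := List.getLast?_eq_none_iff.mp h'
      rw [h'] at hcl
      obtain ⟨hc, hlast⟩ := (hcl : c = 0 ∧ last = 0)
      subst hrs hc hlast
      by_cases hv : v = 0
      · subst hv
        refine ⟨by simpa [lsssStepA, lsssRle, lsssMaxNZ] using hL, by simp [lsssStepA, lsssRle], by simp [lsssRle]⟩
      · refine ⟨?_, by simp [lsssStepA, lsssRle, hv], by simp [lsssRle]⟩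
        simp only [lsssMaxNZ, List.foldl] at hL
        simp [lsssStepA, lsssRle, hv, lsssMaxNZ, hL]
  | some p =>
      obtain ⟨ys, hys⟩ := List.getLast?_eq_some_iff.mp h'
      rw [h'] at hcl
      have hcl' : if p.1 ≠ 0 then c = p.2 ∧ last = p.1 else c = 0 ∧ last = 0 := hcl
      have hdrop : rs.dropLast = ys := by rw [hys]; exact List.dropLast_concat
      have hp2 : (1 : Int) ≤ p.2 := hlen p (by rw [hys]; simp)
      by_cases hpv : p.1 = v
      · -- run continues: bump the last run
        have hrle : lsssRle rs v = ys ++ [(p.1, p.2 + 1)] := by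
          simp [lsssRle, h', hpv, hdrop]
        by_cases hv : v = 0
        · -- v = 0, zero run extended
          subst hv
          have hp1 : p.1 = 0 := hpv
          have hNZ : lsssMaxNZ rs = lsssMaxNZ ys := by
            rw [hys, lsssMaxNZ_concat, if_neg (by simp [hp1])]
          refine ⟨?_, ?_, ?_⟩
          · rw [hrle, lsssMaxNZ_concat, if_neg (by simp [hp1])]
            simpa [lsssStepA, hNZ] using hL
          · simp [lsssStepA, hrle, List.getLast?_concat, hp1]
          · intro q hq
            rw [hrle] at hq
            rcases List.mem_append.mp hq with hq | hq
            · exact hlen q (by rw [hys]; exact List.mem_append_left _ hq)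
            · simp only [List.mem_singleton] at hq; subst hq; simp; omega
        · -- v ≠ 0, nonzero run extended
          have hp1 : p.1 ≠ 0 := by rw [hpv]; exact hv
          rw [if_pos hp1] at hcl'
          obtain ⟨hc, hlast⟩ := hcl'
          have hvlast : v = last := by rw [hlast, hpv]
          refine ⟨?_, ?_, ?_⟩
          · have hLy : L = max (lsssMaxNZ ys) p.2 := by
              rw [hL, hys, lsssMaxNZ_concat, if_pos (by simpa using hp1)]
            simp only [lsssStepA, if_neg hv, if_pos hvlast, hrle, lsssMaxNZ_concat,
              if_pos (by simpa using hp1)]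
            rw [hLy, hc]
            have hmax : max p.2 (p.2 + 1) = p.2 + 1 := by omega
            rw [max_assoc, hmax]
          · simp only [hrle, List.getLast?_concat]
            simp [lsssStepA, hvlast, hp1, hc, hlast]
          · intro q hq
            rw [hrle] at hq
            rcases List.mem_append.mp hq with hq | hq
            · exact hlen q (by rw [hys]; exact List.mem_append_left _ hq)
            · simp only [List.mem_singleton] at hq; subst hq; simp; omega
      · -- new run appended
        have hrle : lsssRle rs v = rs ++ [(v, 1)] := by
          simp [lsssRle, h', hpv]
        by_cases hv : v = 0
        · subst hv
          refine ⟨?_, ?_, ?_⟩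
          · rw [hrle, lsssMaxNZ_concat, if_neg (by simp)]
            simpa [lsssStepA] using hL
          · simp [lsssStepA, hrle]
          · intro q hq
            rcases List.mem_append.mp (by rw [hrle] at hq; exact hq) with hq | hq
            · exact hlen q hq
            · simp only [List.mem_singleton] at hq; subst hq; simp
        · -- v ≠ 0 and v ≠ last (else contradiction with p.1 ≠ v)
          have hvlast : v ≠ last := by
            intro hEq
            by_cases hp1 : p.1 = 0
            · rw [if_neg (by simp [hp1])] at hcl'
              exact hv (hEq.trans hcl'.2)
            · rw [if_pos hp1] at hcl'
              exact hpv (hcl'.2 ▸ hEq.symm)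
          refine ⟨?_, ?_, ?_⟩
          · rw [hrle, lsssMaxNZ_concat, if_pos (by simpa using hv)]
            simp [lsssStepA, hv, hvlast, hL]
          · simp [lsssStepA, hv, hvlast, hrle]
          · intro q hq
            rcases List.mem_append.mp (by rw [hrle] at hq; exact hq) with hq | hq
            · exact hlen q hq
            · simp only [List.mem_singleton] at hq; subst hq; simp

lemma lsssInv_fold (vs : List Int) :
    ∀ (L c last : Int) (rs : List (Int × Int)), lsssInv L c last rs →
      lsssInv (vs.foldl lsssStepA (L, c, last)).1 (vs.foldl lsssStepA (L, c, last)).2.1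
        (vs.foldl lsssStepA (L, c, last)).2.2 (vs.foldl lsssRle rs) := by
  induction vs with
  | nil => intro L c last rs h; simpa using h
  | cons v vs ih =>
      intro L c last rs h
      have := ih (lsssStepA (L, c, last) v).1 (lsssStepA (L, c, last) v).2.1
        (lsssStepA (L, c, last) v).2.2 (lsssRle rs v) (lsssInv_step L c last v rs h)
      simpa using this

lemma lsssMax?_of_nonneg (ls : List Int) (h : ∀ x ∈ ls, (0 : Int) ≤ x) :
    (match PySem.List.max? ls (fun n => n) with | some m => m | none => 0) = ls.foldl max 0 := by
  cases ls with
  | nil =>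
      have : PySem.List.max? ([] : List Int) (fun n => n) = none :=
        (PySem.List.max?_eq_none_iff _ _).mpr rfl
      simp [this]
  | cons x t =>
      rw [PySem.List.max?_id_cons]
      have hx : max 0 x = x := max_eq_right (h x (by simp))
      simp [List.foldl, hx]

lemma lsssMaxNZ_filterMap (rs : List (Int × Int)) :
    ∀ m : Int, rs.foldl (fun m p => if p.1 ≠ 0 then max m p.2 else m) m
      = (rs.filterMap (fun p => if p.1 ≠ 0 then some p.2 else none)).foldl max m := by
  induction rs with
  | nil => intro m; simp
  | cons p t ih =>
      intro m
      by_cases hp : p.1 = 0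
      · have hf : (if p.1 ≠ 0 then some p.2 else none) = none := by simp [hp]
        simp only [List.filterMap_cons, hf, List.foldl_cons, if_neg (by simp [hp] : ¬p.1 ≠ 0)]
        exact ih m
      · have hf : (if p.1 ≠ 0 then some p.2 else none) = some p.2 := by simp [hp]
        simp only [List.filterMap_cons, hf, List.foldl_cons, if_pos (by simp [hp] : p.1 ≠ 0)]
        exact ih (max m p.2)

-- ===== VERDICT (by name: the statement is the Claim_ definition above) =====
theorem longest_same_sign_streak_spec : Claim_equal_longest_same_sign_streak := by
  unfold Claim_equal_longest_same_sign_streak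
  intro values _
  unfold Spec_longest_same_sign_streak longest_same_sign_streak longest_same_sign_streak_alt
  have hbase : lsssInv 0 0 0 [] := by
    refine ⟨by simp [lsssMaxNZ], by simp, by simp⟩
  obtain ⟨hL, -, hlen⟩ := lsssInv_fold values 0 0 0 [] hbase
  set rs := values.foldl lsssRle [] with hrs
  rw [lsssMax?_of_nonneg]
  · rw [hL, lsssMaxNZ, lsssMaxNZ_filterMap]
  · intro x hx
    obtain ⟨p, hp, hpx⟩ := List.mem_filterMap.mp hx
    have hq := hlen p hp
    by_cases h0 : p.1 = 0
    · simp [h0] at hpx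
    · simp [h0] at hpx; omega
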